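-- pv_equiv track=rewrite | github.com/tjken/aoc | 2024/02.py | _validate_reports
-- ===== SOURCE A (Python) =====
-- from enum import Enum
-- from typing import Iterable
--
-- def _is_safe(report: Iterable[int]) -> None:
--     # Iterator loop needs to know the direction it's trending, and the previous number
--     direction = None
--     prev_num = None
--     for idx, num in enumerate(iter(report)):
--         # Sets first prev_num; loops
--         if prev_num is None:
--             prev_num = num
--             continue
--
--         difference = num - prev_num
--         # Changes that aren't between the values of 1 to 3 are considered unsafe
--         if abs(difference) not in range(1, 4): raise ValueError("Report is unsafe", idx)
--
--         # Sets direction on second number; set new prev_num before looping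
--         if direction is None:
--             direction = _Direction.ASCENDING if difference > 0 else _Direction.DESCENDING
--             prev_num = num
--             continue
--
--         # If difference isn't consistent, it's considered unsafe
--         if (direction is _Direction.ASCENDING and difference < 0) or \
--                 (direction is _Direction.DESCENDING and difference > 0):
--             raise ValueError("Report is unsafe", idx)
--
--         # Set new prev_num before continuing loop
--         prev_num = num
--
-- def _validate_reports(reports: Iterable) -> tuple[list, list]:
--     validated_reports = []
--     invalidated_reports = []
--
--     for r in reports:
--         try:
--             _is_safe(r)
--             validated_reports.append(r)
--         except ValueError as err:
--             invalidated_reports.append((r, err.args[1]))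
--
--     return validated_reports, invalidated_reports
--
-- class _Direction(Enum):
--     ASCENDING = 1
--     DESCENDING = 2
-- ===== SOURCE B (Python) =====
-- def _validate_reports(reports):
--     validated_reports = []
--     invalidated_reports = []
--     for r in reports:
--         xs = list(r)
--         # slope sign from the first pair; with <2 elements there are no pairs and it is irrelevant
--         s = 1 if len(xs) > 1 and xs[1] > xs[0] else -1
--         # collect ALL offending positions (step not a climb of 1..3 in direction s), then take the smallest
--         bad = [i for i in range(1, len(xs)) if not (1 <= (xs[i] - xs[i - 1]) * s <= 3)]
--         if bad:
--             invalidated_reports.append((r, min(bad)))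
--         else:
--             validated_reports.append(r)
--     return validated_reports, invalidated_reports
-- ===== Notes on version B (the rewrite author's own statement) =====
-- stated objective: alternative
-- what changed: Instead of A's exception-driven streaming scan with direction/prev state that stops at the first violation, B encodes the direction as a sign multiplier s = +/-1, collects ALL offending positions of each report with an index-range comprehension (no early exit, no diff list, no direction enum), and reports min(bad) as the failure index.
import Mathlib
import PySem

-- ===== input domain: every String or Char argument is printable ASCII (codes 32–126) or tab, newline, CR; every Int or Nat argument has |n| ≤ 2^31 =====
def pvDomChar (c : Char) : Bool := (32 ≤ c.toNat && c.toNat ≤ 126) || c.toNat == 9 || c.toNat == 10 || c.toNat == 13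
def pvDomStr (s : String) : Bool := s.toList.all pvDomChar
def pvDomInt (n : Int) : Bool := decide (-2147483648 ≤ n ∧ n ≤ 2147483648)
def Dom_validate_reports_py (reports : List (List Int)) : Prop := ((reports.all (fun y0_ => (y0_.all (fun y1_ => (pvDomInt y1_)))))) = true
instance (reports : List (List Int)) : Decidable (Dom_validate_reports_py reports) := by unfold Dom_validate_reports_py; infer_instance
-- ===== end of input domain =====

-- B replaces A's exception-driven streaming scan (direction enum + prev state + first-failure exit) by a sign-multiplier
-- check that collects ALL offending positions per report and takes their minimum (alternative decomposition, same cost).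


-- ===== PORT A =====
inductive PyDirection | ascending | descending
deriving DecidableEq, Repr

-- _is_safe's loop: state (direction, prev_num), idx is the enumerate counter; 'some idx' models the ValueError payload
def isSafeLoop (direction : Option PyDirection) (prev : Option Int) (idx : Int) : List Int → Option Int
  | [] => none
  | num :: rest =>
    match prev with
    | none => isSafeLoop direction (some num) (idx + 1) rest
    | some p =>
      let difference := num - p
      if ¬ (1 ≤ |difference| ∧ |difference| ≤ 3) then some idx
      else
        match direction with
        | none =>
          isSafeLoop (some (if difference > 0 then PyDirection.ascending else PyDirection.descending))
            (some num) (idx + 1) rest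
        | some dir =>
          if (dir = PyDirection.ascending ∧ difference < 0) ∨ (dir = PyDirection.descending ∧ difference > 0)
          then some idx
          else isSafeLoop direction (some num) (idx + 1) rest

def isSafe (report : List Int) : Option Int := isSafeLoop none none 0 report

def validate_reports_py (reports : List (List Int)) : List (List Int) × (List (List Int × Int)) :=
  reports.foldl
    (fun acc r =>
      match isSafe r with
      | none => (acc.1 ++ [r], acc.2)
      | some i => (acc.1, acc.2 ++ [(r, i)]))
    ([], [])

-- ===== PORT B =====
-- [i for i in range(1, len(xs)) if not (1 <= (xs[i] - xs[i-1]) * s <= 3)]  (every i is in range, so the default 0 is dead)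
def badIdxs (xs : List Int) (s : Int) : List Int :=
  (PySem.List.pyRange 1 (xs.length : Int) 1).filter
    (fun i => !(decide (1 ≤ (PySem.List.pyGetD xs i 0 - PySem.List.pyGetD xs (i - 1) 0) * s
                        ∧ (PySem.List.pyGetD xs i 0 - PySem.List.pyGetD xs (i - 1) 0) * s ≤ 3)))

def validate_reports_py_alt (reports : List (List Int)) : List (List Int) × (List (List Int × Int)) :=
  reports.foldl
    (fun acc r =>
      let s : Int := if 1 < r.length ∧ PySem.List.pyGetD r 1 0 > PySem.List.pyGetD r 0 0 then 1 else -1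
      match PySem.List.min? (badIdxs r s) (fun z => z) with
      | none => (acc.1 ++ [r], acc.2)
      | some m => (acc.1, acc.2 ++ [(r, m)]))
    ([], [])

-- ===== PRECONDITION & SPEC =====
def Spec_validate_reports_py (reports : List (List Int)) (out : List (List Int) × (List (List Int × Int))) : Prop := out = validate_reports_py_alt reports
instance (reports : List (List Int)) (out : List (List Int) × (List (List Int × Int))) : Decidable (Spec_validate_reports_py reports out) := by unfold Spec_validate_reports_py; infer_instance

-- ===== CLAIM (what is proved, stated in full; the proofs are below) =====
def Claim_equal_validate_reports_py : Prop := ∀ (reports : List (List Int)), Dom_validate_reports_py reports → Spec_validate_reports_py reports (validate_reports_py reports)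

-- ===== LEMMAS AND PROOFS =====

-- first index in [a, b) satisfying p: bridges B's filtered index range to A's first-failure scan
def firstSat (p : Int → Bool) (a b : Int) : Option Int :=
  if h : a < b then (if p a then some a else firstSat p (a + 1) b) else none
termination_by (b - a).toNat
decreasing_by omega

theorem head?_filter_pyRange (p : Int → Bool) (a b : Int) :
    ((PySem.List.pyRange a b 1).filter p).head? = firstSat p a b := by
  have H : ∀ (n : Nat) (a : Int), (b - a).toNat = n →
      ((PySem.List.pyRange a b 1).filter p).head? = firstSat p a b := by
    intro n
    induction n with
    | zero =>
      intro a ha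
      rw [PySem.List.pyRange_one_eq_nil (by omega), firstSat]
      simp [show ¬ a < b by omega]
    | succ n ih =>
      intro a ha
      rw [PySem.List.pyRange_one_cons (by omega), firstSat]
      rw [List.filter_cons]
      cases hp : p a with
      | true => simp [show a < b by omega]
      | false => simp [show a < b by omega, ih (a + 1) (by omega)]
  exact H _ a rfl

theorem foldl_min_eq_self (t : List Int) (x : Int) (h : ∀ y ∈ t, x ≤ y) : t.foldl min x = x := by
  induction t generalizing x with
  | nil => rfl
  | cons a t ih =>
    simp only [List.foldl_cons, min_eq_left (h a (by simp))]
    exact ih x (fun y hy => h y (by simp [hy]))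

theorem min?_id_of_pairwise_lt (l : List Int) (h : l.Pairwise (· < ·)) :
    PySem.List.min? l (fun x => x) = l.head? := by
  cases l with
  | nil => simp [PySem.List.min?]
  | cons x t =>
    rw [PySem.List.min?_id_cons]
    simp only [List.head?_cons, Option.some.injEq]
    exact foldl_min_eq_self t x (fun y hy => le_of_lt ((List.pairwise_cons.mp h).1 y hy))

-- B's per-step test, and A's scan rephrased structurally over (prev, rest)
def badB (s d : Int) : Bool := !(decide (1 ≤ d * s ∧ d * s ≤ 3))

def scanB (s prev : Int) (i : Int) : List Int → Option Int
  | [] => none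
  | n :: l => if badB s (n - prev) then some i else scanB s n (i + 1) l

theorem firstSat_indexed (xs : List Int) (s : Int) :
    ∀ (l u : List Int) (prev : Int), xs = u ++ prev :: l →
    firstSat (fun i => !(decide (1 ≤ (PySem.List.pyGetD xs i 0 - PySem.List.pyGetD xs (i - 1) 0) * s
                        ∧ (PySem.List.pyGetD xs i 0 - PySem.List.pyGetD xs (i - 1) 0) * s ≤ 3)))
      ((u.length : Int) + 1) (xs.length : Int) =
    scanB s prev ((u.length : Int) + 1) l := by
  intro l
  induction l with
  | nil =>
    intro u prev h
    rw [firstSat, scanB]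
    simp [h]
  | cons num l ih =>
    intro u prev h
    have hlen : ((u.length : Int) + 1) < (xs.length : Int) := by simp [h]
    have e1 : PySem.List.pyGetD xs ((u.length : Int) + 1 - 1) 0 = prev := by
      have : ((u.length : Int) + 1 - 1) = ((u.length : Nat) : Int) := by ring
      rw [this, PySem.List.pyGetD_natCast, h]
      simp [List.getD_eq_getElem?_getD]
    have e2 : PySem.List.pyGetD xs ((u.length : Int) + 1) 0 = num := by
      have : ((u.length : Int) + 1) = (((u.length + 1 : Nat)) : Int) := by push_cast; ring
      rw [this, PySem.List.pyGetD_natCast, h]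
      simp [List.getD_eq_getElem?_getD]
    rw [firstSat, scanB]
    rw [dif_pos hlen]
    simp only [e1, e2]
    have hrec := ih (u ++ [prev]) num (by simp [h])
    simp only [List.length_append, List.length_cons, List.length_nil] at hrec
    push_cast at hrec ⊢
    rw [show (u.length : Int) + 1 + 1 = (u.length : Int) + (0 + 1) + 1 by ring] at hrec
    unfold badB
    split <;> simp_all

theorem loop_eq_scan (dir : PyDirection) (l : List Int) :
    ∀ (p i : Int), isSafeLoop (some dir) (some p) i l =
      scanB (if dir = PyDirection.ascending then 1 else -1) p i l := by
  induction l with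
  | nil => intro p i; rfl
  | cons num rest ih =>
    intro p i
    cases dir <;>
      simp only [isSafeLoop, scanB, badB, Bool.not_eq_true', decide_eq_false_iff_not,
        reduceCtorEq, reduceIte, mul_one, mul_neg_one, false_and, true_and,
        or_false, false_or, if_false] at ih ⊢ <;>
      rcases abs_cases (num - p) with ⟨ha, _⟩ | ⟨ha, _⟩ <;>
      rw [ha] <;>
      split_ifs with h1 h2 <;>
      first
        | (exfalso; omega)
        | rw [ih]
        | rfl

theorem pyGetD_one_cons (x y : Int) (rest : List Int) :
    PySem.List.pyGetD (x :: y :: rest) 1 0 = y := by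
  simp [pysem]

theorem pyGetD_one_sub_one (x y : Int) (rest : List Int) :
    PySem.List.pyGetD (x :: y :: rest) ((1:Int) - 1) 0 = x := by
  norm_num

theorem perReport_cons (x y : Int) (rest : List Int) (s : Int)
    (hs : s = if x < y then 1 else -1) :
    isSafe (x :: y :: rest) = PySem.List.min? (badIdxs (x :: y :: rest) s) (fun z => z) := by
  have hpair : (badIdxs (x :: y :: rest) s).Pairwise (· < ·) :=
    List.Pairwise.filter _ (PySem.List.pairwise_lt_pyRange_one _ _)
  rw [min?_id_of_pairwise_lt _ hpair]
  unfold badIdxs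
  rw [head?_filter_pyRange]
  rw [firstSat]
  have hn : (1:Int) < (((x :: y :: rest).length : Nat) : Int) := by simp
  rw [dif_pos hn, pyGetD_one_cons, pyGetD_one_sub_one]
  by_cases hxy : x < y
  · rw [if_pos hxy] at hs; subst hs
    simp only [mul_one]
    by_cases hok : 1 ≤ y - x ∧ y - x ≤ 3
    · rw [if_neg (by simp; omega)]
      have h2 := firstSat_indexed (x :: y :: rest) 1 rest [x] y rfl
      norm_num at h2 ⊢
      rw [h2]
      simp only [isSafe, isSafeLoop]
      rw [if_neg (by rcases abs_cases (y - x) with ⟨h, _⟩ | ⟨h, _⟩ <;> omega)]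
      rw [if_pos (by omega : y - x > 0)]
      rw [loop_eq_scan]
      simp
    · rw [if_pos (by simp; omega)]
      simp only [isSafe, isSafeLoop]
      rw [if_pos (by rcases abs_cases (y - x) with ⟨h, _⟩ | ⟨h, _⟩ <;> omega)]
      norm_num
  · rw [if_neg hxy] at hs; subst hs
    by_cases hok : 1 ≤ (y - x) * (-1) ∧ (y - x) * (-1) ≤ 3
    · rw [if_neg (by simp; omega)]
      have h2 := firstSat_indexed (x :: y :: rest) (-1) rest [x] y rfl
      norm_num at h2 ⊢
      rw [h2]
      simp only [isSafe, isSafeLoop]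
      rw [if_neg (by rcases abs_cases (y - x) with ⟨h, _⟩ | ⟨h, _⟩ <;> omega)]
      rw [if_neg (by omega : ¬ y - x > 0)]
      rw [loop_eq_scan]
      simp
    · rw [if_pos (by simp; omega)]
      simp only [isSafe, isSafeLoop]
      rw [if_pos (by rcases abs_cases (y - x) with ⟨h, _⟩ | ⟨h, _⟩ <;> omega)]
      norm_num

theorem perReport (r : List Int) :
    isSafe r = PySem.List.min?
      (badIdxs r (if 1 < r.length ∧ PySem.List.pyGetD r 1 0 > PySem.List.pyGetD r 0 0 then 1 else -1))
      (fun z => z) := by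
  match r with
  | [] => rfl
  | [x] =>
    have hb : ∀ s : Int, badIdxs [x] s = [] := by
      intro s
      unfold badIdxs
      rw [PySem.List.pyRange_one_eq_nil (by simp)]
      rfl
    rw [hb]
    rfl
  | x :: y :: rest =>
    have hc : (if 1 < (x :: y :: rest).length ∧
        PySem.List.pyGetD (x :: y :: rest) 1 0 > PySem.List.pyGetD (x :: y :: rest) 0 0
        then (1:Int) else -1) = if x < y then 1 else -1 := by
      rw [pyGetD_one_cons]
      simp [PySem.List.pyGetD_zero_cons]
    rw [hc]
    exact perReport_cons x y rest _ rfl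

-- ===== VERDICT (by name: the statement is the Claim_ definition above) =====
theorem validate_reports_py_spec : Claim_equal_validate_reports_py := by
  intro reports _
  unfold Spec_validate_reports_py validate_reports_py validate_reports_py_alt
  have hf : (fun (acc : List (List Int) × List (List Int × Int)) (r : List Int) =>
      match isSafe r with
      | none => (acc.1 ++ [r], acc.2)
      | some i => (acc.1, acc.2 ++ [(r, i)])) =
      (fun acc r =>
        let s : Int := if 1 < r.length ∧ PySem.List.pyGetD r 1 0 > PySem.List.pyGetD r 0 0 then 1 else -1
        match PySem.List.min? (badIdxs r s) (fun z => z) with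
        | none => (acc.1 ++ [r], acc.2)
        | some m => (acc.1, acc.2 ++ [(r, m)])) := by
    funext acc r
    rw [perReport r]
  rw [hf]
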